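-- pv_equiv track=rewrite | github.com/panchishin/story_writer | generate_story.py | create_copy_of_tasks
-- ===== SOURCE A (Python) =====
-- def create_copy_of_tasks(index, chapters, task_output):
--     copy_task_output = dict(task_output)
--     MAX_CHAPTERS = 10
--     if index > MAX_CHAPTERS:
--         for i in range(0, index-MAX_CHAPTERS):
--             if chapters[i] in copy_task_output:
--                 del copy_task_output[chapters[i]]
--         for i in range(index-MAX_CHAPTERS,index):
--             if f"summary of {chapters[i]}" in copy_task_output:
--                 del copy_task_output[f"summary of {chapters[i]}"]
--     return copy_task_output
-- ===== SOURCE B (Python) =====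
-- def create_copy_of_tasks(index, chapters, task_output):
--     if index <= 10:
--         return dict(task_output)
--     old = set(chapters[:index - 10])
--     recent = set(chapters[index - 10:index])
--     result = {}
--     for k, v in dict(task_output).items():
--         if k in old or (k.startswith("summary of ") and k[11:] in recent):
--             continue
--         result[k] = v
--     return result
-- ===== Notes on version B (the rewrite author's own statement) =====
-- stated objective: alternative
-- what changed: B inverts the direction of the computation: instead of generating every removal key from chapter indices and deleting them one by one from a dict copy, it classifies chapters into old/recent sets by slicing and then decides each dict key directly by structural parsing (set membership for plain keys, 'summary of ' prefix-strip plus membership for summary keys) in one pass over the dict.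
import Mathlib
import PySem

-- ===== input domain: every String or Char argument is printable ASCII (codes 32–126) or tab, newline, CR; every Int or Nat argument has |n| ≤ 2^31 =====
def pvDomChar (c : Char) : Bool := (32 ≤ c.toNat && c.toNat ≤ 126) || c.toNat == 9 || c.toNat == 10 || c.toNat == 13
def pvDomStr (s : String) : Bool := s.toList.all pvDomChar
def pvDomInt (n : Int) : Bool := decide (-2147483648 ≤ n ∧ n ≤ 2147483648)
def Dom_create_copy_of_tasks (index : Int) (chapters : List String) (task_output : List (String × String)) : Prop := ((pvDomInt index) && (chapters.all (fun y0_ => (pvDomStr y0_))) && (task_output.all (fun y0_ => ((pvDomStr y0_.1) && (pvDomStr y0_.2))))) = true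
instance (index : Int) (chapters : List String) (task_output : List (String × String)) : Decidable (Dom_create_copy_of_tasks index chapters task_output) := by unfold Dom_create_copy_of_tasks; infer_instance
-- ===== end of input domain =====

-- B inverts the direction of the work: instead of generating every stale key from chapter
-- indices and deleting it from a dict copy, it slices chapters into old/recent sets once and
-- classifies each dict key directly ('summary of ' prefix-strip + set membership) in one pass.

-- ===== PORT A =====
def create_copy_of_tasks (index : Int) (chapters : List String) (task_output : List (String × String)) : List (String × String) :=
  let copy := PySem.Dict.ofList task_output        -- copy_task_output = dict(task_output)
  if index > 10 then                               -- MAX_CHAPTERS = 10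
    -- chapters[i]: pyGetD is exact under Pre_ (i in range; IndexError inputs are excluded by Pre_)
    let copy := (PySem.List.pyRange 0 (index - 10)).foldl
      (fun d i =>
        let c := PySem.List.pyGetD chapters i ""
        if d.contains c then d.erase c else d) copy
    let copy := (PySem.List.pyRange (index - 10) index).foldl
      (fun d i =>
        let c := "summary of " ++ PySem.List.pyGetD chapters i ""
        if d.contains c then d.erase c else d) copy
    copy.items
  else copy.items

-- ===== PORT B =====
def create_copy_of_tasks_alt (index : Int) (chapters : List String) (task_output : List (String × String)) : List (String × String) :=
  if index ≤ 10 then (PySem.Dict.ofList task_output).items       -- return dict(task_output)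
  else
    let old : PySem.Set String :=
      PySem.Set.ofList (PySem.List.slice chapters none (some (index - 10)))      -- set(chapters[:index-10])
    let recent : PySem.Set String :=
      PySem.Set.ofList (PySem.List.slice chapters (some (index - 10)) (some index))  -- set(chapters[index-10:index])
    -- for k, v in dict(task_output).items(): skip old chapters and 'summary of ' + recent chapter
    ((PySem.Dict.ofList task_output).items.foldl
      (fun d p =>
        if PySem.Set.contains old p.1
            || (PySem.Str.startswith p.1 "summary of "
                && PySem.Set.contains recent (PySem.Str.slice p.1 (some 11) none))
        then d
        else d.insert p.1 p.2)
      PySem.Dict.empty).items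

-- ===== PRECONDITION & SPEC =====
-- Pre_ excludes exactly the inputs where Python A raises IndexError: when index > 10 it reads
-- chapters[i] for every 0 ≤ i < index, so index must not exceed len(chapters).
def Pre_create_copy_of_tasks (index : Int) (chapters : List String) (task_output : List (String × String)) : Prop :=
  index > 10 → index ≤ (chapters.length : Int)
instance (index : Int) (chapters : List String) (task_output : List (String × String)) : Decidable (Pre_create_copy_of_tasks index chapters task_output) := by unfold Pre_create_copy_of_tasks; infer_instance
def pvWitness_create_copy_of_tasks : Int × List String × (List (String × String)) :=
  (12, ["c1", "c2", "c3", "c4", "c5", "c6", "c7", "c8", "c9", "c10", "c11", "c12"],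
   [("c1", "old text"), ("summary of c3", "s3"), ("summary of c12", "s12"), ("plot", "p")])
def Spec_create_copy_of_tasks (index : Int) (chapters : List String) (task_output : List (String × String)) (out : List (String × String)) : Prop := out = create_copy_of_tasks_alt index chapters task_output
instance (index : Int) (chapters : List String) (task_output : List (String × String)) (out : List (String × String)) : Decidable (Spec_create_copy_of_tasks index chapters task_output out) := by unfold Spec_create_copy_of_tasks; infer_instance

-- ===== CLAIM (what is proved, stated in full; the proofs are below) =====
def Claim_equal_create_copy_of_tasks : Prop := ∀ (index : Int) (chapters : List String) (task_output : List (String × String)), Dom_create_copy_of_tasks index chapters task_output → Pre_create_copy_of_tasks index chapters task_output → Spec_create_copy_of_tasks index chapters task_output (create_copy_of_tasks index chapters task_output)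

-- ===== LEMMAS AND PROOFS =====

-- A's guarded delete 'if c in d: del d[c]' is an unconditional erase.
theorem pvErase_of_not_contains (d : PySem.Dict String String) (c : String)
    (h : d.contains c = false) : d.erase c = d := by
  apply PySem.Dict.ext
  show d.items.filter _ = d.items
  apply List.filter_eq_self.mpr
  intro p hp
  simp only [PySem.Dict.contains, List.any_eq_false] at h
  simp [h p hp]

theorem pvFoldl_erase_map (f : Int → String) (R : List Int) :
    ∀ d : PySem.Dict String String,
      R.foldl (fun d i => if d.contains (f i) then d.erase (f i) else d) d
        = (R.map f).foldl (fun d c => d.erase c) d := by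
  induction R with
  | nil => intro d; rfl
  | cons i R ih =>
    intro d
    rw [List.map_cons, List.foldl_cons, List.foldl_cons, ← ih]
    by_cases h : d.contains (f i)
    · simp [h]
    · simp [h, pvErase_of_not_contains d (f i) (by simpa using h)]

theorem pvFoldl_erase (K : List String) :
    ∀ d : PySem.Dict String String,
      (K.foldl (fun d c => d.erase c) d).items
        = d.items.filter (fun p => !(K.contains p.1)) := by
  induction K with
  | nil => intro d; simp
  | cons c K ih =>
    intro d
    rw [List.foldl_cons, ih]
    show ((d.items.filter _).filter _) = _
    rw [List.filter_filter]
    apply List.filter_congr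
    intro p _
    by_cases hpc : p.1 = c <;> simp [hpc]

-- 'k = "summary of " ++ s' is exactly 'k startswith "summary of " and k[11:] = s'.
theorem pvSummaryKey (k s : String) :
    k = "summary of " ++ s
      ↔ (PySem.Str.startswith k "summary of " = true ∧ PySem.Str.slice k (some 11) none = s) := by
  have hP : ((11:Int)).toNat = ("summary of " : String).toList.length := by decide
  constructor
  · rintro rfl
    refine ⟨?_, ?_⟩
    · rw [PySem.Str.startswith_eq]
      exact (PySem.Chars.startswith_iff _ _).mpr ⟨s.toList, by simp⟩
    · apply String.toList_inj.mp
      rw [PySem.Str.toList_slice, PySem.Chars.slice_eq_listSlice,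
        PySem.List.slice_from _ (by norm_num), String.toList_append, hP, List.drop_left]
  · rintro ⟨h1, h2⟩
    rw [PySem.Str.startswith_eq] at h1
    obtain ⟨t, ht⟩ := (PySem.Chars.startswith_iff _ _).mp h1
    have hs : s.toList = t := by
      rw [← h2, PySem.Str.toList_slice, PySem.Chars.slice_eq_listSlice,
        PySem.List.slice_from _ (by norm_num), ← ht, hP, List.drop_left]
    apply String.toList_inj.mp
    rw [String.toList_append, hs, ht]

-- The union of A's two generated key families tests exactly as B's structural key test.
theorem pvKeyTest (chapters : List String) (index : Int)
    (h10 : 10 < index) (hlen : index ≤ (chapters.length : Int)) (k : String) :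
    (((PySem.List.pyRange 0 (index - 10)).map (fun i => PySem.List.pyGetD chapters i ""))
      ++ ((PySem.List.pyRange (index - 10) index).map
            (fun i => "summary of " ++ PySem.List.pyGetD chapters i ""))).contains k
    = (PySem.Set.contains
          (PySem.Set.ofList (PySem.List.slice chapters none (some (index - 10)))) k
        || (PySem.Str.startswith k "summary of "
            && PySem.Set.contains
                (PySem.Set.ofList (PySem.List.slice chapters (some (index - 10)) (some index)))
                (PySem.Str.slice k (some 11) none))) := by
  have hc0 : (0:Int) ≤ index - 10 := by omega
  have hn0 : (0:Int) ≤ index := by omega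
  have hc' : index - 10 = (((index - 10).toNat : Nat) : Int) := (Int.toNat_of_nonneg hc0).symm
  have hn' : index = ((index.toNat : Nat) : Int) := (Int.toNat_of_nonneg hn0).symm
  set c : Nat := (index - 10).toNat with hcdef
  set n : Nat := index.toNat with hndef
  have hnlen : n ≤ chapters.length := by omega
  have hcn : c ≤ n := by omega
  rw [Bool.eq_iff_iff, hc', hn', PySem.List.slice_to_natCast, PySem.List.slice_natCast]
  simp only [List.contains_iff_mem, Bool.or_eq_true, Bool.and_eq_true,
    PySem.Set.contains_iff, PySem.Set.mem_ofList, List.mem_append, List.mem_map]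
  constructor
  · rintro (⟨i, hi, rfl⟩ | ⟨i, hi, rfl⟩)
    · obtain ⟨hi0, hi1⟩ := PySem.List.mem_pyRange_one.mp hi
      have hilen : i < (chapters.length : Int) := by omega
      left
      rw [PySem.List.pyGetD_eq_getElem chapters "" hi0 hilen]
      exact List.mem_take_iff_getElem.mpr ⟨i.toNat, by omega, rfl⟩
    · obtain ⟨hi0, hi1⟩ := PySem.List.mem_pyRange_one.mp hi
      have hi0' : (0:Int) ≤ i := by omega
      have hilen : i < (chapters.length : Int) := by omega
      right
      rw [PySem.List.pyGetD_eq_getElem chapters "" hi0' hilen]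
      obtain ⟨hsw, hsl⟩ := (pvSummaryKey _ chapters[i.toNat]).mp rfl
      refine ⟨hsw, ?_⟩
      rw [hsl]
      refine List.mem_take_iff_getElem.mpr ⟨i.toNat - c, by simp; omega, ?_⟩
      rw [List.getElem_drop]
      congr 1
      omega
  · rintro (hmem | ⟨hsw, hmem⟩)
    · obtain ⟨j, hj, rfl⟩ := List.mem_take_iff_getElem.mp hmem
      left
      refine ⟨(j : Int), PySem.List.mem_pyRange_one.mpr ⟨by omega, by simp at hj; omega⟩, ?_⟩
      rw [PySem.List.pyGetD_eq_getElem chapters "" (by omega)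
        (by exact_mod_cast hj.trans_le (min_le_right _ _))]
      simp
    · obtain ⟨j, hj, hjel⟩ := List.mem_take_iff_getElem.mp hmem
      have hjd : j < (chapters.drop c).length := lt_of_lt_of_le hj (min_le_right _ _)
      rw [List.getElem_drop] at hjel
      have hk : k = "summary of " ++ chapters[c + j] :=
        (pvSummaryKey k chapters[c + j]).mpr ⟨hsw, by rw [hjel]⟩
      right
      refine ⟨((c + j : Nat) : Int), PySem.List.mem_pyRange_one.mpr ⟨by omega, by simp at hj; omega⟩, ?_⟩
      rw [PySem.List.pyGetD_eq_getElem chapters "" (by omega) (by push_cast; omega)]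
      rw [hk]
      have hcj : ((c:Int) + (j:Int)).toNat = c + j := by omega
      simp [hcj]

-- B's insert loop over the dict's (Nodup-key) items is the filtered items list.
theorem pvInsertLoop (l : List (String × String)) (q : String × String → Bool)
    (hnd : (l.map Prod.fst).Nodup) :
    ((l.filter q).foldl (fun d p => d.insert p.1 p.2) PySem.Dict.empty).items = l.filter q := by
  rw [PySem.Dict.items_foldl_insert_fresh (l.filter q) Prod.fst Prod.snd PySem.Dict.empty
    (fun a _ => by simp [PySem.Dict.contains_empty])
    (hnd.sublist (List.Sublist.map Prod.fst List.filter_sublist))]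
  simp [PySem.Dict.empty]

theorem pvIf_flip {α : Type} (b : Bool) (x y : α) :
    (if b then x else y) = if !b then y else x := by cases b <;> rfl

-- ===== VERDICT (by name: the statement is the Claim_ definition above) =====
theorem create_copy_of_tasks_spec : Claim_equal_create_copy_of_tasks := by
  intro index chapters task_output _dom hpre
  unfold Spec_create_copy_of_tasks create_copy_of_tasks create_copy_of_tasks_alt
  by_cases h : index > 10
  · have hlen := hpre h
    simp only [if_pos h, if_neg (by omega : ¬ index ≤ 10)]
    rw [pvFoldl_erase_map, pvFoldl_erase_map, ← List.foldl_append, pvFoldl_erase]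
    have hflip : ∀ (d : PySem.Dict String String) (p : String × String),
        (if PySem.Set.contains (PySem.Set.ofList
              (PySem.List.slice chapters none (some (index - 10)))) p.1
            || (PySem.Str.startswith p.1 "summary of "
                && PySem.Set.contains (PySem.Set.ofList
                      (PySem.List.slice chapters (some (index - 10)) (some index)))
                    (PySem.Str.slice p.1 (some 11) none))
          then d else d.insert p.1 p.2)
        = (if !((((PySem.List.pyRange 0 (index - 10)).map
                    (fun i => PySem.List.pyGetD chapters i ""))
                ++ ((PySem.List.pyRange (index - 10) index).map
                      (fun i => "summary of " ++ PySem.List.pyGetD chapters i ""))).contains p.1)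
           then d.insert p.1 p.2 else d) := by
      intro d p
      rw [pvKeyTest chapters index h hlen p.1, pvIf_flip]
    simp only [hflip]
    rw [PySem.List.foldl_if_eq_foldl_filter]
    rw [pvInsertLoop _ _ (PySem.Dict.nodup_keys_ofList task_output)]
  · simp only [if_neg h, if_pos (by omega : index ≤ 10)]
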